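-- pv_equiv track=rewrite | github.com/eliottcassidy2000/math | 04-computation/typed_indep_n7_fast.py | I_at_2_fast
-- ===== SOURCE A (Python) =====
-- def I_at_2_fast(cycles_list):
--     """Independence polynomial at x=2 via divide-and-conquer."""
--     nc = len(cycles_list)
--     if nc == 0:
--         return 1
--     cvsets = [frozenset(c) for c in cycles_list]
--     adj = {}
--     for i in range(nc):
--         adj[i] = frozenset(j for j in range(nc) if j != i and cvsets[i] & cvsets[j])
--
--     memo = {}
--     def solve(verts):
--         if verts in memo:
--             return memo[verts]
--         if not verts:
--             return 1
--         v = max(verts, key=lambda u: len(adj[u] & verts))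
--         without = solve(verts - {v})
--         with_v = solve(verts - (adj[v] & verts) - {v})
--         result = without + 2 * with_v
--         memo[verts] = result
--         return result
--
--     return solve(frozenset(range(nc)))
-- ===== SOURCE B (Python) =====
-- def I_at_2_fast(cycles_list):
--     """Independence polynomial at x=2: product over connected components of the
--     cycle-intersection graph, each component evaluated by head-in/head-out recursion."""
--     n = len(cycles_list)
--     vsets = [set(c) for c in cycles_list]
--
--     def touches(u, v):
--         return bool(vsets[u] & vsets[v])
--
--     seen = set()
--     result = 1
--     for s in range(n):
--         if s in seen:
--             continue
--         # connected component of s: grow to the closure under 'touches'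
--         comp = {s}
--         while True:
--             grown = comp | {u for u in range(n) if any(touches(u, v) for v in comp)}
--             if grown == comp:
--                 break
--             comp = grown
--         # weighted independent-set count (weight 2 per chosen vertex) of the component
--         memo = {}
--         def g(vs):
--             if not vs:
--                 return 1
--             if vs in memo:
--                 return memo[vs]
--             v, rest = vs[0], vs[1:]
--             r = g(rest) + 2 * g(tuple(u for u in rest if not touches(u, v)))
--             memo[vs] = r
--             return r
--         result *= g(tuple(sorted(comp)))
--         seen |= comp
--     return result
-- ===== Notes on version B (the rewrite author's own statement) =====
-- stated objective: alternative
-- what changed: A runs one global memoized branch-and-bound recursion with a max-overlap pivot over the whole vertex set; B first splits the cycle-intersection graph into connected components by an iterated-expansion closure and multiplies per-component counts, each component evaluated by a least-vertex in/out recursion over sorted vertex lists.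
import Mathlib
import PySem

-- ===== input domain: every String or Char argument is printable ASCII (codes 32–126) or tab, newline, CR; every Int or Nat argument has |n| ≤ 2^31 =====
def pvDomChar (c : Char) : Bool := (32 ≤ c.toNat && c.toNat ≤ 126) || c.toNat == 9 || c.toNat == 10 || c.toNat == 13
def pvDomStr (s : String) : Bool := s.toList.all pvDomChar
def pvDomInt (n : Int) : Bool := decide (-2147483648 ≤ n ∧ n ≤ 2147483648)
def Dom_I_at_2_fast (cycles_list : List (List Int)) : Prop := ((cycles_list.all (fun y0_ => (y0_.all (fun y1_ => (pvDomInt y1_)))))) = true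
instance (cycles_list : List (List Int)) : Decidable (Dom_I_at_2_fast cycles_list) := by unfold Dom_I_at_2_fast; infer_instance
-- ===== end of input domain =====

-- B replaces A's global memoized pivot-branching by a connected-component decomposition of the
-- cycle-intersection graph, multiplying per-component counts obtained by a least-vertex
-- head-in/head-out recursion (alternative algorithm, same worst-case cost).
-- Both Python versions memoize a pure function; the ports perform the same recursions uncached,
-- which returns the identical value.

-- ===== PORT A =====

-- shared-vertex test: Python's `cvsets[i] & cvsets[j]` is truthy iff the two cycles share an element
def pvTouch (cs : List (List Int)) (i j : ℕ) : Bool :=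
  (cs.getD i []).any (fun x => (cs.getD j []).contains x)

-- A's adj[i] = frozenset(j for j in range(nc) if j != i and cvsets[i] & cvsets[j]) (dict of sets → function)
def pvAdjA (cs : List (List Int)) (i : ℕ) : List ℕ :=
  (List.range cs.length).filter (fun j => decide (j ≠ i) && pvTouch cs i j)

-- A's pivot key: len(adj[u] & verts)
def pvKeyA (cs : List (List Int)) (verts : List ℕ) (u : ℕ) : ℕ :=
  ((pvAdjA cs u).filter (fun j => verts.contains j)).length

-- Python max(_, key=…): keep the first element attaining the maximal key
def pvMaxBy (key : ℕ → ℕ) : ℕ → List ℕ → ℕ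
  | b, [] => b
  | b, u :: rest => pvMaxBy key (if key b < key u then u else b) rest

theorem pvMaxBy_mem (key : ℕ → ℕ) (b : ℕ) (l : List ℕ) : pvMaxBy key b l = b ∨ pvMaxBy key b l ∈ l := by
  induction l generalizing b with
  | nil => left; rfl
  | cons u rest ih =>
    rcases ih (if key b < key u then u else b) with h | h
    · rw [pvMaxBy, h]; split <;> simp
    · right; simp [pvMaxBy, h]

-- A's solve (memo elided: it caches the pure recursion and does not change the value)
def pvSolveA (cs : List (List Int)) (verts : List ℕ) : Int :=
  match hv : verts with
  | [] => 1
  | v0 :: rest =>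
    let v := pvMaxBy (pvKeyA cs (v0 :: rest)) v0 rest
    let without := pvSolveA cs ((v0 :: rest).erase v)
    let with_v := pvSolveA cs (((v0 :: rest).erase v).filter (fun u => !(pvAdjA cs v).contains u))
    without + 2 * with_v
termination_by verts.length
decreasing_by
  · have hm : pvMaxBy (pvKeyA cs (v0 :: rest)) v0 rest ∈ v0 :: rest := by
      rcases pvMaxBy_mem (pvKeyA cs (v0 :: rest)) v0 rest with h | h
      · rw [h]; exact List.mem_cons_self
      · exact List.mem_cons_of_mem _ h
    have := List.length_erase_of_mem hm
    simp_all
  · have hm : pvMaxBy (pvKeyA cs (v0 :: rest)) v0 rest ∈ v0 :: rest := by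
      rcases pvMaxBy_mem (pvKeyA cs (v0 :: rest)) v0 rest with h | h
      · rw [h]; exact List.mem_cons_self
      · exact List.mem_cons_of_mem _ h
    have h1 := List.length_filter_le (fun u => !(pvAdjA cs (pvMaxBy (pvKeyA cs (v0 :: rest)) v0 rest)).contains u) ((v0 :: rest).erase (pvMaxBy (pvKeyA cs (v0 :: rest)) v0 rest))
    have h2 := List.length_erase_of_mem hm
    simp_all

def I_at_2_fast (cycles_list : List (List Int)) : Int :=
  let nc := cycles_list.length
  if nc = 0 then 1 else pvSolveA cycles_list (List.range nc)

-- ===== PORT B =====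

-- one expansion round: comp | {u for u in range(n) if any(touches(u, v) for v in comp)}
def pvExpand (cs : List (List Int)) (n : ℕ) (S : Finset ℕ) : Finset ℕ :=
  S ∪ (Finset.range n).filter (fun u => ∃ v ∈ S, pvTouch cs u v = true)

theorem pvExpand_card_lt (cs : List (List Int)) (n : ℕ) (S : Finset ℕ)
    (h : ¬ pvExpand cs n S = S) :
    (Finset.range n \ pvExpand cs n S).card < (Finset.range n \ S).card := by
  have hsub : S ⊆ pvExpand cs n S := Finset.subset_union_left
  have hne : ∃ x ∈ pvExpand cs n S, x ∉ S := by
    by_contra hc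
    push Not at hc
    exact h (Finset.Subset.antisymm (fun x hx => hc x hx) hsub)
  obtain ⟨x, hx, hxS⟩ := hne
  have hxr : x ∈ Finset.range n := by
    rcases Finset.mem_union.1 hx with h1 | h1
    · exact absurd h1 hxS
    · exact (Finset.mem_filter.1 h1).1
  apply Finset.card_lt_card
  refine ⟨Finset.sdiff_subset_sdiff (Finset.Subset.refl _) hsub, ?_⟩
  intro hle
  have hx2 := hle (Finset.mem_sdiff.2 ⟨hxr, hxS⟩)
  exact (Finset.mem_sdiff.1 hx2).2 hx

-- the while-loop: grow until a round adds nothing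
def pvClose (cs : List (List Int)) (n : ℕ) (S : Finset ℕ) : Finset ℕ :=
  if pvExpand cs n S = S then S else pvClose cs n (pvExpand cs n S)
termination_by (Finset.range n \ S).card
decreasing_by exact pvExpand_card_lt cs n S (by assumption)

-- per-component weighted independent-set count: head out / head in (memo elided, as for A)
def pvG (cs : List (List Int)) (l : List ℕ) : Int :=
  match l with
  | [] => 1
  | v :: rest => pvG cs rest + 2 * pvG cs (rest.filter (fun u => !(pvTouch cs u v)))
termination_by l.length
decreasing_by
  · simp
  · have h1 := List.length_filter_le (fun x : {u // u ∈ rest} => !(pvTouch cs x.1 v)) rest.attach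
    simp at h1 ⊢
    omega

def pvStepB (cs : List (List Int)) (n : ℕ) (st : Finset ℕ × Int) (s : ℕ) : Finset ℕ × Int :=
  if s ∈ st.1 then st
  else
    let comp := pvClose cs n {s}
    (st.1 ∪ comp, st.2 * pvG cs (comp.sort (· ≤ ·)))

def I_at_2_fast_alt (cycles_list : List (List Int)) : Int :=
  let n := cycles_list.length
  ((List.range n).foldl (pvStepB cycles_list n) (∅, 1)).2

-- ===== PRECONDITION & SPEC =====
def Spec_I_at_2_fast (cycles_list : List (List Int)) (out : Int) : Prop := out = I_at_2_fast_alt cycles_list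
instance (cycles_list : List (List Int)) (out : Int) : Decidable (Spec_I_at_2_fast cycles_list out) := by unfold Spec_I_at_2_fast; infer_instance

-- ===== CLAIM (what is proved, stated in full; the proofs are below) =====
def Claim_equal_I_at_2_fast : Prop := ∀ (cycles_list : List (List Int)), Dom_I_at_2_fast cycles_list → Spec_I_at_2_fast cycles_list (I_at_2_fast cycles_list)

-- ===== LEMMAS AND PROOFS =====

-- the common specification: W S = Σ over independent T ⊆ S of 2^|T|
abbrev pvIndep (cs : List (List Int)) (S : Finset ℕ) : Prop :=
  ∀ i ∈ S, ∀ j ∈ S, i ≠ j → pvTouch cs i j = false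

def pvW (cs : List (List Int)) (S : Finset ℕ) : Int :=
  ∑ T ∈ S.powerset, if pvIndep cs T then (2 : Int) ^ T.card else 0

theorem pvTouch_true_iff (cs : List (List Int)) (i j : ℕ) :
    pvTouch cs i j = true ↔ ∃ x, x ∈ cs.getD i [] ∧ x ∈ cs.getD j [] := by
  simp [pvTouch, List.any_eq_true]

theorem pvTouch_symm (cs : List (List Int)) (i j : ℕ) : pvTouch cs i j = pvTouch cs j i := by
  cases hij : pvTouch cs i j <;> cases hji : pvTouch cs j i <;> try rfl
  · obtain ⟨x, h1, h2⟩ := (pvTouch_true_iff cs j i).1 hji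
    have h := (pvTouch_true_iff cs i j).2 ⟨x, h2, h1⟩
    rw [hij] at h
    exact h
  · obtain ⟨x, h1, h2⟩ := (pvTouch_true_iff cs i j).1 hij
    have h := (pvTouch_true_iff cs j i).2 ⟨x, h2, h1⟩
    rw [hji] at h
    exact h.symm

theorem pvIndep_empty (cs : List (List Int)) : pvIndep cs ∅ := by
  intro i hi
  exact absurd hi (by simp)

theorem pvW_empty (cs : List (List Int)) : pvW cs ∅ = 1 := by
  rw [pvW, Finset.powerset_empty, Finset.sum_singleton, if_pos (pvIndep_empty cs)]
  simp

-- deletion lemma: pivot on v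
theorem pvW_pivot (cs : List (List Int)) (V : Finset ℕ) (v : ℕ) (hv : v ∈ V) :
    pvW cs V = pvW cs (V.erase v) +
      2 * pvW cs ((V.erase v).filter (fun u => pvTouch cs u v = false)) := by
  set V' := V.erase v with hV'
  set F := V'.filter (fun u => pvTouch cs u v = false) with hF
  have hvV' : v ∉ V' := Finset.notMem_erase v V
  have hins : V = insert v V' := (Finset.insert_erase hv).symm
  rw [hins, pvW, Finset.sum_powerset_insert hvV']
  have step1 : ∀ t ∈ V'.powerset,
      (if pvIndep cs (insert v t) then (2 : Int) ^ (insert v t).card else 0)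
        = 2 * (if pvIndep cs t ∧ t ⊆ F then (2 : Int) ^ t.card else 0) := by
    intro t ht
    have htV' : t ⊆ V' := Finset.mem_powerset.1 ht
    have hvt : v ∉ t := fun h => hvV' (htV' h)
    by_cases hI : pvIndep cs (insert v t)
    · rw [if_pos hI, if_pos, Finset.card_insert_of_notMem hvt, pow_succ]
      · ring
      constructor
      · intro i hi j hj hij
        exact hI i (Finset.mem_insert_of_mem hi) j (Finset.mem_insert_of_mem hj) hij
      · intro u hu
        refine Finset.mem_filter.2 ⟨htV' hu, ?_⟩
        exact hI u (Finset.mem_insert_of_mem hu) v (Finset.mem_insert_self v t)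
          (fun h => hvt (h ▸ hu))
    · rw [if_neg hI, if_neg]
      · ring
      rintro ⟨hIt, htF⟩
      apply hI
      intro i hi j hj hij
      rcases Finset.mem_insert.1 hi with rfl | hi'
      · rcases Finset.mem_insert.1 hj with rfl | hj'
        · exact absurd rfl hij
        · rw [pvTouch_symm]
          exact (Finset.mem_filter.1 (htF hj')).2
      · rcases Finset.mem_insert.1 hj with rfl | hj'
        · exact (Finset.mem_filter.1 (htF hi')).2
        · exact hIt i hi' j hj' hij
  rw [Finset.sum_congr rfl step1, ← Finset.mul_sum]
  have h2 : ∑ t ∈ F.powerset, (if pvIndep cs t ∧ t ⊆ F then (2 : Int) ^ t.card else 0)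
      = ∑ t ∈ V'.powerset, (if pvIndep cs t ∧ t ⊆ F then (2 : Int) ^ t.card else 0) := by
    apply Finset.sum_subset
    · exact Finset.powerset_mono.2 (Finset.filter_subset _ _)
    · intro t _ htF
      rw [if_neg]
      rintro ⟨_, hsub⟩
      exact htF (Finset.mem_powerset.2 hsub)
  rw [← h2]
  have h3 : ∑ t ∈ F.powerset, (if pvIndep cs t ∧ t ⊆ F then (2 : Int) ^ t.card else 0)
      = pvW cs F := by
    apply Finset.sum_congr rfl
    intro t ht
    have : t ⊆ F := Finset.mem_powerset.1 ht
    by_cases hI : pvIndep cs t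
    · rw [if_pos ⟨hI, this⟩, if_pos hI]
    · rw [if_neg (fun h => hI h.1), if_neg hI]
  rw [h3]
  rfl

-- multiplicativity over parts with no edges between them
theorem pvW_mul (cs : List (List Int)) (V1 V2 : Finset ℕ) (hd : Disjoint V1 V2)
    (hcross : ∀ u ∈ V1, ∀ v ∈ V2, pvTouch cs u v = false) :
    pvW cs (V1 ∪ V2) = pvW cs V1 * pvW cs V2 := by
  have H : ∀ k (V1 : Finset ℕ), V1.card ≤ k → ∀ V2 : Finset ℕ, Disjoint V1 V2 →
      (∀ u ∈ V1, ∀ v ∈ V2, pvTouch cs u v = false) →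
      pvW cs (V1 ∪ V2) = pvW cs V1 * pvW cs V2 := by
    intro k
    induction k with
    | zero =>
      intro V1 hk V2 _ _
      have : V1 = ∅ := Finset.card_eq_zero.1 (Nat.le_zero.1 hk)
      subst this
      rw [Finset.empty_union, pvW_empty, one_mul]
    | succ k ih =>
      intro V1 hk V2 hd hcross
      rcases Finset.eq_empty_or_nonempty V1 with rfl | ⟨a, ha⟩
      · rw [Finset.empty_union, pvW_empty, one_mul]
      have haV2 : a ∉ V2 := fun h => (Finset.disjoint_left.1 hd) ha h
      have hmemU : a ∈ V1 ∪ V2 := Finset.mem_union_left _ ha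
      rw [pvW_pivot cs (V1 ∪ V2) a hmemU]
      have e1 : (V1 ∪ V2).erase a = (V1.erase a) ∪ V2 := by
        ext x
        simp only [Finset.mem_erase, Finset.mem_union]
        constructor
        · rintro ⟨hne, h | h⟩
          · exact Or.inl ⟨hne, h⟩
          · exact Or.inr h
        · rintro (⟨hne, h⟩ | h)
          · exact ⟨hne, Or.inl h⟩
          · exact ⟨fun he => haV2 (he ▸ h), Or.inr h⟩
      have e2 : ((V1.erase a) ∪ V2).filter (fun u => pvTouch cs u a = false)
          = ((V1.erase a).filter (fun u => pvTouch cs u a = false)) ∪ V2 := by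
        rw [Finset.filter_union]
        congr 1
        apply Finset.filter_eq_self.2
        intro w hw
        rw [pvTouch_symm]
        exact hcross a ha w hw
      have hcard1 : (V1.erase a).card ≤ k := by
        have h1 : 0 < V1.card := Finset.card_pos.2 ⟨a, ha⟩
        have := Finset.card_erase_of_mem ha
        omega
      have hcard2 : ((V1.erase a).filter (fun u => pvTouch cs u a = false)).card ≤ k :=
        le_trans (Finset.card_filter_le _ _) hcard1
      have hd1 : Disjoint (V1.erase a) V2 :=
        Finset.disjoint_of_subset_left (Finset.erase_subset a V1) hd
      have hd2 : Disjoint ((V1.erase a).filter (fun u => pvTouch cs u a = false)) V2 :=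
        Finset.disjoint_of_subset_left (Finset.filter_subset _ _) hd1
      have hc1 : ∀ u ∈ V1.erase a, ∀ w ∈ V2, pvTouch cs u w = false := by
        intro u hu w hw
        exact hcross u (Finset.mem_of_mem_erase hu) w hw
      have hc2 : ∀ u ∈ (V1.erase a).filter (fun u => pvTouch cs u a = false), ∀ w ∈ V2,
          pvTouch cs u w = false := by
        intro u hu w hw
        exact hc1 u (Finset.mem_of_mem_filter u hu) w hw
      rw [e1, e2, ih _ hcard1 V2 hd1 hc1, ih _ hcard2 V2 hd2 hc2,
        pvW_pivot cs V1 a ha]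
      ring
  exact H V1.card V1 le_rfl V2 hd hcross

-- A's recursion computes W
theorem pvSolveA_eq (cs : List (List Int)) (l : List ℕ) (hn : l.Nodup)
    (hb : ∀ x ∈ l, x < cs.length) : pvSolveA cs l = pvW cs l.toFinset := by
  have H : ∀ k (l : List ℕ), l.length ≤ k → l.Nodup → (∀ x ∈ l, x < cs.length) →
      pvSolveA cs l = pvW cs l.toFinset := by
    intro k
    induction k with
    | zero =>
      intro l hk hn hb
      cases l with
      | nil => simp only [pvSolveA, List.toFinset_nil]; rw [pvW_empty]
      | cons v rest => simp at hk
    | succ k ih =>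
      intro l hk hn hb
      cases l with
      | nil => simp only [pvSolveA, List.toFinset_nil]; rw [pvW_empty]
      | cons v0 rest =>
        simp only [pvSolveA]
        set v := pvMaxBy (pvKeyA cs (v0 :: rest)) v0 rest with hvdef
        have hvmem : v ∈ v0 :: rest := by
          rcases pvMaxBy_mem (pvKeyA cs (v0 :: rest)) v0 rest with h | h
          · rw [hvdef, h]; exact List.mem_cons_self
          · exact List.mem_cons_of_mem _ h
        have hne : (((v0 :: rest) : List ℕ).erase v).Nodup := hn.erase v
        have hle : (((v0 :: rest) : List ℕ).erase v).length ≤ k := by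
          have := List.length_erase_of_mem hvmem
          simp only [List.length_cons] at this hk
          omega
        have hbe : ∀ x ∈ ((v0 :: rest) : List ℕ).erase v, x < cs.length :=
          fun x hx => hb x (List.mem_of_mem_erase hx)
        have hnf : ((((v0 :: rest) : List ℕ).erase v).filter
            (fun u => !(pvAdjA cs v).contains u)).Nodup := hne.filter _
        have hlf : ((((v0 :: rest) : List ℕ).erase v).filter
            (fun u => !(pvAdjA cs v).contains u)).length ≤ k :=
          le_trans (List.length_filter_le _ _) hle
        have hbf : ∀ x ∈ (((v0 :: rest) : List ℕ).erase v).filter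
            (fun u => !(pvAdjA cs v).contains u), x < cs.length :=
          fun x hx => hbe x (List.mem_of_mem_filter hx)
        rw [ih _ hle hne hbe, ih _ hlf hnf hbf]
        have e1 : (((v0 :: rest) : List ℕ).erase v).toFinset = (v0 :: rest).toFinset.erase v := by
          ext x
          simp only [List.mem_toFinset, Finset.mem_erase, hn.mem_erase_iff]
        have e2 : ((((v0 :: rest) : List ℕ).erase v).filter
              (fun u => !(pvAdjA cs v).contains u)).toFinset
            = ((v0 :: rest).toFinset.erase v).filter (fun u => pvTouch cs u v = false) := by
          ext x
          simp only [List.mem_toFinset, List.mem_filter, Finset.mem_filter, ← e1,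
            List.mem_toFinset]
          constructor
          · rintro ⟨hx, hbx⟩
            refine ⟨hx, ?_⟩
            have hxl : x ∈ v0 :: rest := List.mem_of_mem_erase hx
            have hxlt : x < cs.length := hb x hxl
            have hxne : x ≠ v := (hn.mem_erase_iff.1 hx).1
            cases hval : pvTouch cs x v with
            | false => rfl
            | true =>
              exfalso
              have hmem : x ∈ pvAdjA cs v := by
                simp only [pvAdjA, List.mem_filter, List.mem_range]
                refine ⟨hxlt, ?_⟩
                simp only [Bool.and_eq_true, decide_eq_true_eq]
                exact ⟨hxne, by rw [pvTouch_symm]; exact hval⟩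
              simp [hmem] at hbx
          · rintro ⟨hx, htv⟩
            refine ⟨hx, ?_⟩
            have hnotmem : x ∉ pvAdjA cs v := by
              intro hmem
              simp only [pvAdjA, List.mem_filter, Bool.and_eq_true, decide_eq_true_eq] at hmem
              rw [pvTouch_symm, hmem.2.2] at htv
              exact absurd htv (by simp)
            simpa using hnotmem
        rw [pvW_pivot cs (v0 :: rest).toFinset v (List.mem_toFinset.2 hvmem), e1, e2]
  exact H l.length l le_rfl hn hb

-- B's per-component recursion computes W
theorem pvG_eq (cs : List (List Int)) (l : List ℕ) (hn : l.Nodup) :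
    pvG cs l = pvW cs l.toFinset := by
  have H : ∀ k (l : List ℕ), l.length ≤ k → l.Nodup → pvG cs l = pvW cs l.toFinset := by
    intro k
    induction k with
    | zero =>
      intro l hk hn
      cases l with
      | nil => simp only [pvG, List.toFinset_nil]; rw [pvW_empty]
      | cons v rest => simp at hk
    | succ k ih =>
      intro l hk hn
      cases l with
      | nil => simp only [pvG, List.toFinset_nil]; rw [pvW_empty]
      | cons v rest =>
        simp only [pvG]
        have hnr : rest.Nodup := hn.of_cons
        have hvr : v ∉ rest := (List.nodup_cons.1 hn).1
        have hlen : rest.length ≤ k := by simp at hk; omega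
        have hlenf : (rest.filter (fun u => !(pvTouch cs u v))).length ≤ k :=
          le_trans (List.length_filter_le _ _) hlen
        have hnf : (rest.filter (fun u => !(pvTouch cs u v))).Nodup := hnr.filter _
        rw [ih rest hlen hnr, ih _ hlenf hnf]
        have hvmem : v ∈ (v :: rest).toFinset := by simp
        rw [pvW_pivot cs (v :: rest).toFinset v hvmem]
        have e1 : (v :: rest).toFinset.erase v = rest.toFinset := by
          rw [List.toFinset_cons, Finset.erase_insert (by simp [hvr])]
        have e2 : (rest.filter (fun u => !(pvTouch cs u v))).toFinset
            = rest.toFinset.filter (fun u => pvTouch cs u v = false) := by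
          ext x
          simp [List.mem_toFinset, Bool.not_eq_eq_eq_not]
        rw [e1, e2]
  exact H l.length l le_rfl hn

def pvClosed (cs : List (List Int)) (n : ℕ) (T : Finset ℕ) : Prop :=
  ∀ u ∈ Finset.range n, ∀ v ∈ T, pvTouch cs u v = true → u ∈ T

theorem pvExpand_superset (cs : List (List Int)) (n : ℕ) (S : Finset ℕ) :
    S ⊆ pvExpand cs n S := Finset.subset_union_left

theorem pvClose_superset (cs : List (List Int)) (n : ℕ) (S : Finset ℕ) : S ⊆ pvClose cs n S := by
  have H : ∀ k (S : Finset ℕ), (Finset.range n \ S).card ≤ k → S ⊆ pvClose cs n S := by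
    intro k
    induction k with
    | zero =>
      intro S hk
      rw [pvClose]
      split_ifs with h
      · exact Finset.Subset.refl _
      · have := pvExpand_card_lt cs n S h
        omega
    | succ k ih =>
      intro S hk
      rw [pvClose]
      split_ifs with h
      · exact Finset.Subset.refl _
      · have hlt := pvExpand_card_lt cs n S h
        exact (pvExpand_superset cs n S).trans (ih (pvExpand cs n S) (by omega))
  exact H _ S le_rfl

theorem pvExpand_subset_range (cs : List (List Int)) (n : ℕ) (S : Finset ℕ)
    (h : S ⊆ Finset.range n) : pvExpand cs n S ⊆ Finset.range n :=
  Finset.union_subset h (Finset.filter_subset _ _)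

theorem pvClose_subset_range (cs : List (List Int)) (n : ℕ) (S : Finset ℕ)
    (h : S ⊆ Finset.range n) : pvClose cs n S ⊆ Finset.range n := by
  have H : ∀ k (S : Finset ℕ), (Finset.range n \ S).card ≤ k → S ⊆ Finset.range n →
      pvClose cs n S ⊆ Finset.range n := by
    intro k
    induction k with
    | zero =>
      intro S hk hS
      rw [pvClose]
      split_ifs with h
      · exact hS
      · have := pvExpand_card_lt cs n S h
        omega
    | succ k ih =>
      intro S hk hS
      rw [pvClose]
      split_ifs with h
      · exact hS
      · have hlt := pvExpand_card_lt cs n S h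
        exact ih (pvExpand cs n S) (by omega) (pvExpand_subset_range cs n S hS)
  exact H _ S le_rfl h

theorem pvClosed_of_fix (cs : List (List Int)) (n : ℕ) (S : Finset ℕ)
    (h : pvExpand cs n S = S) : pvClosed cs n S := by
  intro u hur v hv ht
  have : u ∈ pvExpand cs n S :=
    Finset.mem_union_right _ (Finset.mem_filter.2 ⟨hur, ⟨v, hv, ht⟩⟩)
  rwa [h] at this

theorem pvClose_closed (cs : List (List Int)) (n : ℕ) (S : Finset ℕ) :
    pvClosed cs n (pvClose cs n S) := by
  have H : ∀ k (S : Finset ℕ), (Finset.range n \ S).card ≤ k →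
      pvClosed cs n (pvClose cs n S) := by
    intro k
    induction k with
    | zero =>
      intro S hk
      rw [pvClose]
      split_ifs with h
      · exact pvClosed_of_fix cs n S h
      · have := pvExpand_card_lt cs n S h
        omega
    | succ k ih =>
      intro S hk
      rw [pvClose]
      split_ifs with h
      · exact pvClosed_of_fix cs n S h
      · have hlt := pvExpand_card_lt cs n S h
        exact ih (pvExpand cs n S) (by omega)
  exact H _ S le_rfl

theorem pvExpand_disjoint (cs : List (List Int)) (n : ℕ) (S T : Finset ℕ)
    (hT : pvClosed cs n T) (hd : Disjoint S T) (hS : S ⊆ Finset.range n) :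
    Disjoint (pvExpand cs n S) T := by
  rw [Finset.disjoint_left]
  intro x hx hxT
  rcases Finset.mem_union.1 hx with h1 | h1
  · exact (Finset.disjoint_left.1 hd) h1 hxT
  · obtain ⟨hxr, v, hv, ht⟩ := Finset.mem_filter.1 h1
    have hvr : v ∈ Finset.range n := hS hv
    have : v ∈ T := hT v hvr x hxT (by rw [pvTouch_symm]; exact ht)
    exact (Finset.disjoint_left.1 hd) hv this

theorem pvClose_disjoint (cs : List (List Int)) (n : ℕ) (S T : Finset ℕ)
    (hT : pvClosed cs n T) (hd : Disjoint S T) (hS : S ⊆ Finset.range n) :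
    Disjoint (pvClose cs n S) T := by
  have H : ∀ k (S : Finset ℕ), (Finset.range n \ S).card ≤ k → Disjoint S T →
      S ⊆ Finset.range n → Disjoint (pvClose cs n S) T := by
    intro k
    induction k with
    | zero =>
      intro S hk hd hS
      rw [pvClose]
      split_ifs with h
      · exact hd
      · have := pvExpand_card_lt cs n S h
        omega
    | succ k ih =>
      intro S hk hd hS
      rw [pvClose]
      split_ifs with h
      · exact hd
      · have hlt := pvExpand_card_lt cs n S h
        exact ih (pvExpand cs n S) (by omega) (pvExpand_disjoint cs n S T hT hd hS)
          (pvExpand_subset_range cs n S hS)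
  exact H _ S le_rfl hd hS

def pvInv (cs : List (List Int)) (n : ℕ) (st : Finset ℕ × Int) : Prop :=
  st.1 ⊆ Finset.range n ∧ pvClosed cs n st.1 ∧ st.2 = pvW cs st.1

theorem pvStepB_inv (cs : List (List Int)) (n : ℕ) (st : Finset ℕ × Int) (s : ℕ)
    (hs : s < n) (h : pvInv cs n st) :
    pvInv cs n (pvStepB cs n st s) ∧ st.1 ⊆ (pvStepB cs n st s).1 ∧ s ∈ (pvStepB cs n st s).1 := by
  obtain ⟨hsub, hcl, hres⟩ := h
  by_cases hmem : s ∈ st.1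
  · simp only [pvStepB, if_pos hmem]
    exact ⟨⟨hsub, hcl, hres⟩, Finset.Subset.refl _, hmem⟩
  · simp only [pvStepB, if_neg hmem]
    set comp := pvClose cs n {s} with hcomp
    have hs_sub : ({s} : Finset ℕ) ⊆ Finset.range n := by
      simp [Finset.singleton_subset_iff, Finset.mem_range, hs]
    have hcs : comp ⊆ Finset.range n := pvClose_subset_range _ _ _ hs_sub
    have hscomp : s ∈ comp := pvClose_superset _ _ _ (Finset.mem_singleton_self s)
    have hdisj : Disjoint comp st.1 :=
      pvClose_disjoint cs n {s} st.1 hcl (Finset.disjoint_singleton_left.2 hmem) hs_sub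
    have hclosedc : pvClosed cs n comp := pvClose_closed cs n {s}
    have hcross : ∀ u ∈ st.1, ∀ w ∈ comp, pvTouch cs u w = false := by
      intro u hu w hwc
      cases hval : pvTouch cs u w with
      | false => rfl
      | true =>
        exfalso
        have hur : u ∈ Finset.range n := hsub hu
        have humem : u ∈ comp := hclosedc u hur w hwc hval
        exact (Finset.disjoint_left.1 hdisj) humem hu
    refine ⟨⟨?_, ?_, ?_⟩, ?_, ?_⟩
    · exact Finset.union_subset hsub hcs
    · intro u hur w hw htw
      rcases Finset.mem_union.1 hw with h1 | h1
      · exact Finset.mem_union_left _ (hcl u hur w h1 htw)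
      · exact Finset.mem_union_right _ (hclosedc u hur w h1 htw)
    · have hnd : (comp.sort (· ≤ ·)).Nodup := comp.sort_nodup _
      have hts : (comp.sort (· ≤ ·)).toFinset = comp := comp.sort_toFinset _
      rw [hres, pvG_eq cs _ hnd, hts, pvW_mul cs st.1 comp hdisj.symm hcross]
    · exact Finset.subset_union_left
    · exact Finset.mem_union_right _ hscomp

theorem pvFoldB (cs : List (List Int)) (n : ℕ) (l : List ℕ) (st : Finset ℕ × Int)
    (hl : ∀ x ∈ l, x < n) (h : pvInv cs n st) :
    pvInv cs n (l.foldl (pvStepB cs n) st) ∧ st.1 ⊆ (l.foldl (pvStepB cs n) st).1 ∧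
      ∀ x ∈ l, x ∈ (l.foldl (pvStepB cs n) st).1 := by
  induction l generalizing st with
  | nil => exact ⟨h, Finset.Subset.refl _, by simp⟩
  | cons x xs ih =>
    simp only [List.foldl_cons]
    obtain ⟨h1, h2, h3⟩ := pvStepB_inv cs n st x (hl x List.mem_cons_self) h
    obtain ⟨H1, H2, H3⟩ := ih (pvStepB cs n st x)
      (fun y hy => hl y (List.mem_cons_of_mem _ hy)) h1
    refine ⟨H1, h2.trans H2, ?_⟩
    intro y hy
    rcases List.mem_cons.1 hy with rfl | hy'
    · exact H2 h3
    · exact H3 y hy'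

theorem pvAlt_eq (cs : List (List Int)) : I_at_2_fast_alt cs = pvW cs (Finset.range cs.length) := by
  have hinv : pvInv cs cs.length ((∅ : Finset ℕ), (1 : Int)) := by
    refine ⟨Finset.empty_subset _, ?_, (pvW_empty cs).symm⟩
    intro u _ w hw
    exact absurd hw (by simp)
  obtain ⟨⟨hsub, _, hres⟩, _, hall⟩ :=
    pvFoldB cs cs.length (List.range cs.length) (∅, 1)
      (fun x hx => List.mem_range.1 hx) hinv
  have hfin : ((List.range cs.length).foldl (pvStepB cs cs.length) (∅, 1)).1
      = Finset.range cs.length := by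
    apply Finset.Subset.antisymm hsub
    intro x hx
    exact hall x (List.mem_range.2 (Finset.mem_range.1 hx))
  show ((List.range cs.length).foldl (pvStepB cs cs.length) (∅, 1)).2
      = pvW cs (Finset.range cs.length)
  rw [hres, hfin]

theorem pvA_eq (cs : List (List Int)) : I_at_2_fast cs = pvW cs (Finset.range cs.length) := by
  by_cases h : cs.length = 0
  · show (if cs.length = 0 then 1 else pvSolveA cs (List.range cs.length))
      = pvW cs (Finset.range cs.length)
    rw [if_pos h, h]
    simp only [Finset.range_zero]
    rw [pvW_empty]
  · show (if cs.length = 0 then 1 else pvSolveA cs (List.range cs.length))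
      = pvW cs (Finset.range cs.length)
    rw [if_neg h,
      pvSolveA_eq cs (List.range cs.length) (List.nodup_range) (fun x hx => List.mem_range.1 hx),
      List.toFinset_range]

-- ===== VERDICT (by name: the statement is the Claim_ definition above) =====
theorem I_at_2_fast_spec : Claim_equal_I_at_2_fast := by
  intro cs _
  unfold Spec_I_at_2_fast
  rw [pvA_eq, pvAlt_eq]
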